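-- pv_equiv track=rewrite | github.com/JorgeZorrilla/QuantumComputing | ShorProject/math_func.py | module_finding
-- ===== SOURCE A (Python) =====
-- def module_finding(x, N):
--     objective = x % N
--
--     i = 0
--     while True:
--         if i % N == objective:
--             return i
--         else:
--             i += 1
-- ===== SOURCE B (Python) =====
-- def module_finding(x, N):
--     # closed form: smallest i >= 0 with i % N == x % N is (x % N) % abs(N)
--     return (x % N) % abs(N)
-- ===== Notes on version B (the rewrite author's own statement) =====
-- stated objective: faster
-- what changed: Replaced the unbounded incrementing scan for the first i with i % N == x % N by the closed form (x % N) % abs(N), which normalizes the residue into [0, abs(N)) directly.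
import Mathlib
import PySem

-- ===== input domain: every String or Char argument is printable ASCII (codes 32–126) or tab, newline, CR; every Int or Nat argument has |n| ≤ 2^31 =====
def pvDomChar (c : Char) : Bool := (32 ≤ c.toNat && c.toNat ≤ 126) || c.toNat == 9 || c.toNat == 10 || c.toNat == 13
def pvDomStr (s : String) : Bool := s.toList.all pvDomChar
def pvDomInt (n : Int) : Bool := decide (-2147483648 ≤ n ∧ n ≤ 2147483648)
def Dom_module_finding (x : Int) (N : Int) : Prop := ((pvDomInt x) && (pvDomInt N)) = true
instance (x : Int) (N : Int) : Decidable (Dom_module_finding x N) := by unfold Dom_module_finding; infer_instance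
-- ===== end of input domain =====

-- B replaces A's unbounded incrementing scan by the closed form (x % N) % abs(N).

-- ===== PORT A =====
-- A's `while True` loop: i = 0; if i % N == objective: return i; else: i += 1.
-- The fuel argument only makes this same computation total: for N ≠ 0 the loop
-- returns within |N| iterations, so fuel N.natAbs is never exhausted.
def moduleLoop (N objective : Int) : Nat → Int → Int
  | 0, i => i
  | fuel + 1, i =>
      if PySem.Int.mod i N = objective then i
      else moduleLoop N objective fuel (i + 1)

def module_finding (x : Int) (N : Int) : Int :=
  moduleLoop N (PySem.Int.mod x N) N.natAbs 0

-- ===== PORT B =====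
def module_finding_alt (x : Int) (N : Int) : Int :=
  PySem.Int.mod (PySem.Int.mod x N) |N|

-- ===== PRECONDITION & SPEC =====
-- Python's `x % N` (and hence A) raises ZeroDivisionError when N == 0.
def Pre_module_finding (x : Int) (N : Int) : Prop := N ≠ 0
instance (x : Int) (N : Int) : Decidable (Pre_module_finding x N) := by
  unfold Pre_module_finding; infer_instance
def pvWitness_module_finding : Int × Int := (7, 3)

def Spec_module_finding (x : Int) (N : Int) (out : Int) : Prop := out = module_finding_alt x N
instance (x : Int) (N : Int) (out : Int) : Decidable (Spec_module_finding x N out) := by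
  unfold Spec_module_finding; infer_instance

-- ===== CLAIM (what is proved, stated in full; the proofs are below) =====
def Claim_equal_module_finding : Prop :=
  ∀ (x : Int) (N : Int), Dom_module_finding x N → Pre_module_finding x N →
    Spec_module_finding x N (module_finding x N)

-- ===== LEMMAS AND PROOFS =====

-- value of Python's `%` on the interval [0, |N|)
theorem pyMod_small (N i : Int) (hN : N ≠ 0) (h0 : 0 ≤ i) (h1 : i < |N|) :
    PySem.Int.mod i N = if 0 < N then i else if i = 0 then 0 else i + N := by
  show Int.fmod i N = _
  rw [Int.fmod_eq_emod]
  rcases lt_or_gt_of_ne hN with hneg | hpos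
  · have habs : |N| = -N := abs_of_neg hneg
    have hmod : i % N = i := by
      rw [← Int.emod_neg, Int.emod_eq_of_lt h0 (by omega)]
    by_cases hdvd : N ∣ i
    · have h2 : i % (-N) = 0 := Int.emod_eq_zero_of_dvd ((neg_dvd).mpr hdvd)
      have h3 : i % (-N) = i := Int.emod_eq_of_lt h0 (by omega)
      have hi0 : i = 0 := by omega
      rw [hmod, if_pos (Or.inr hdvd), if_neg (by omega), if_pos hi0]
      omega
    · have hi0 : i ≠ 0 := fun he => hdvd (by rw [he]; exact dvd_zero N)
      rw [hmod, if_neg (by rintro (h | h); exacts [absurd h (by omega), hdvd h]),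
        if_neg (by omega), if_neg hi0]
  · have habs : |N| = N := abs_of_pos hpos
    rw [Int.emod_eq_of_lt h0 (habs ▸ h1), if_pos (Or.inl hpos.le), if_pos hpos]
    omega

-- Python's `%` by N is injective on [0, |N|)
theorem pyMod_inj (N i j : Int) (hN : N ≠ 0) (hi0 : 0 ≤ i) (hi1 : i < |N|)
    (hj0 : 0 ≤ j) (hj1 : j < |N|) (h : PySem.Int.mod i N = PySem.Int.mod j N) : i = j := by
  rw [pyMod_small N i hN hi0 hi1, pyMod_small N j hN hj0 hj1] at h
  rcases lt_or_gt_of_ne hN with hneg | hpos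
  · have habs : |N| = -N := abs_of_neg hneg
    have hnp : ¬ (0:Int) < N := by omega
    rw [if_neg hnp, if_neg hnp] at h
    split_ifs at h <;> omega
  · rw [if_pos hpos, if_pos hpos] at h; exact h

-- Python's `%` by a positive |N| is Lean's emod
theorem pyMod_abs_eq_emod (r N : Int) : PySem.Int.mod r |N| = r % |N| := by
  show Int.fmod r |N| = _
  rw [Int.fmod_eq_emod, if_pos (Or.inl (abs_nonneg N))]
  ring

-- the closed form lands back on the objective residue
theorem pyMod_idem (N r : Int) (hN : N ≠ 0) (h1 : 0 < N → 0 ≤ r ∧ r < N)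
    (h2 : N < 0 → N < r ∧ r ≤ 0) :
    PySem.Int.mod (PySem.Int.mod r |N|) N = r := by
  rw [pyMod_abs_eq_emod r N]
  rcases lt_or_gt_of_ne hN with hneg | hpos
  · have habs : |N| = -N := abs_of_neg hneg
    obtain ⟨hr1, hr2⟩ := h2 hneg
    by_cases hr0 : r = 0
    · subst hr0
      rw [Int.zero_emod, pyMod_small N 0 hN le_rfl (by omega), if_neg (by omega), if_pos rfl]
    · have he : r % |N| = r - N := by
        have h' : (r + |N| * 1) % |N| = r % |N| := Int.add_mul_emod_self_left r |N| 1
        rw [habs] at h'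
        have h'' : (r - N) % |N| = r % |N| := by rw [habs]; rw [← h']; ring_nf
        rw [← h'', Int.emod_eq_of_lt (by omega) (by omega)]
      rw [he, pyMod_small N (r - N) hN (by omega) (by omega), if_neg (by omega),
        if_neg (by omega)]
      ring
  · have habs : |N| = N := abs_of_pos hpos
    obtain ⟨hr1, hr2⟩ := h1 hpos
    rw [habs, Int.emod_eq_of_lt hr1 hr2, pyMod_small N r hN hr1 (by omega), if_pos hpos]

-- the loop starting at i returns t, the unique match
theorem loop_reaches (N r t : Int) (ht0 : 0 ≤ t)
    (htr : PySem.Int.mod t N = r)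
    (huniq : ∀ i : Int, 0 ≤ i → i < t → PySem.Int.mod i N ≠ r) :
    ∀ (fuel : Nat) (i : Int), 0 ≤ i → i ≤ t → t.toNat + 1 ≤ fuel + i.toNat →
      moduleLoop N r fuel i = t := by
  intro fuel
  induction fuel with
  | zero => intro i hi0 hit hf; omega
  | succ f ih =>
    intro i hi0 hit hf
    unfold moduleLoop
    by_cases h : PySem.Int.mod i N = r
    · rw [if_pos h]
      rcases lt_or_eq_of_le hit with h' | h'
      · exact absurd h (huniq i hi0 h')
      · exact h'
    · rw [if_neg h]
      have hilt : i < t := lt_of_le_of_ne hit (fun he => h (he ▸ htr))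
      exact ih (i + 1) (by omega) (by omega) (by omega)

-- ===== VERDICT (by name: the statement is the Claim_ definition above) =====
theorem module_finding_spec : Claim_equal_module_finding := by
  intro x N _ hN
  unfold Spec_module_finding module_finding
  have hrb1 : 0 < N → 0 ≤ PySem.Int.mod x N ∧ PySem.Int.mod x N < N := fun h =>
    ⟨PySem.Int.mod_nonneg (a := x) (b := N) h, PySem.Int.mod_lt (a := x) (b := N) h⟩
  have hrb2 : N < 0 → N < PySem.Int.mod x N ∧ PySem.Int.mod x N ≤ 0 := fun h =>
    PySem.Int.mod_neg_bounds (a := x) (b := N) h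
  have habs : (0:Int) < |N| := abs_pos.mpr hN
  have htE : module_finding_alt x N = (PySem.Int.mod x N) % |N| := pyMod_abs_eq_emod _ N
  have ht0 : 0 ≤ module_finding_alt x N := htE ▸ Int.emod_nonneg _ (by omega)
  have ht1 : module_finding_alt x N < |N| := htE ▸ Int.emod_lt_of_pos _ habs
  have htr : PySem.Int.mod (module_finding_alt x N) N = PySem.Int.mod x N :=
    pyMod_idem N (PySem.Int.mod x N) hN hrb1 hrb2
  have huniq : ∀ i : Int, 0 ≤ i → i < module_finding_alt x N →
      PySem.Int.mod i N ≠ PySem.Int.mod x N := by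
    intro i hi0 hit h
    have := pyMod_inj N i (module_finding_alt x N) hN hi0 (by omega) ht0 ht1
      (h.trans htr.symm)
    omega
  have hcast : |N| = (N.natAbs : Int) := Int.abs_eq_natAbs N
  exact loop_reaches N _ _ ht0 htr huniq N.natAbs 0 le_rfl ht0 (by omega)
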